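-- pv_equiv track=rewrite | github.com/voschezang/Data-Mining | cleanstresslevels.py | clean_stress_levels
-- ===== SOURCE A (Python) =====
-- def clean_stress_levels(value):
-- 	# make list containing all numbers of string
-- 	numbers = []
-- 	for c in value:
-- 		if c.isdigit():
-- 			numbers.append(c)
-- 		if c == ',':
-- 			break
-- 		if c == '-':
-- 			numbers = [0]
-- 			break
--
-- 	# when there are no numbers inside the string assuma value = 50
-- 	if numbers == []:
-- 		numbers = [5, 0]
-- 		value = int(''.join(map(str, numbers)))
-- 	else:
-- 		value = int(''.join(map(str, numbers)))
--
-- 	# if value is over 100, put value to 100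
-- 	if value > 100:
-- 		value = 100
-- 	return value
-- ===== SOURCE B (Python) =====
-- def clean_stress_levels(value):
-- 	# Simpler: truncate at the first comma, then inspect the prefix in separate passes.
-- 	prefix = value.split(',', 1)[0]
-- 	if '-' in prefix:
-- 		value = 0
-- 	else:
-- 		digits = ''.join(c for c in prefix if c.isdigit())
-- 		value = int(digits) if digits else 50
-- 	return min(value, 100)
-- ===== Notes on version B (the rewrite author's own statement) =====
-- stated objective: simpler
-- what changed: Replaces A's single early-breaking character loop with mutable flag state by a truncate-then-inspect pipeline: split at the first comma, check the prefix for '-', filter its digits, default 50, cap with min.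
import Mathlib
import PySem

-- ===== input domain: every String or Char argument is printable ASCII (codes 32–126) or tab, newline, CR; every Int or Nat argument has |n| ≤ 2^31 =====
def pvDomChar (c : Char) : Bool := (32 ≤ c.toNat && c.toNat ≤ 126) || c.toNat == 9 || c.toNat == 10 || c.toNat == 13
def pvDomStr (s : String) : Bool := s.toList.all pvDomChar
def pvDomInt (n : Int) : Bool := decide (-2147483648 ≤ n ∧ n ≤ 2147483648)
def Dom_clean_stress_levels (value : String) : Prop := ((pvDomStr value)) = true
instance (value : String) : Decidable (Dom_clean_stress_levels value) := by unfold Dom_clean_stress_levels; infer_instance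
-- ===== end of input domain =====

-- B replaces A's single early-breaking char loop by a truncate-at-comma, check-dash, filter-digits pipeline (objective: simpler).
-- ===== PORT A =====
-- A's loop: collect digit chars into `numbers`, break at ',', reset to ['0'] and break at '-'.
-- (Python's `numbers = [0]` followed by ''.join(map(str, numbers)) is the string "0", i.e. the char '0'.)
def csl_loop : List Char → List Char → List Char
  | [], numbers => numbers
  | c :: rest, numbers =>
    let numbers' := if c.isDigit then numbers ++ [c] else numbers
    if c = ',' then numbers'
    else if c = '-' then ['0']
    else csl_loop rest numbers'

-- Char.isDigit is exact for str.isdigit on the printable-ASCII domain.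
def clean_stress_levels (value : String) : Int :=
  let numbers := csl_loop value.toList []
  let numbers := if numbers = [] then ['5', '0'] else numbers
  let v := (PySem.Int.ofStr? (String.mk numbers)).getD 0
  if v > 100 then 100 else v

-- ===== PORT B =====
-- value.split(',', 1)[0] is exactly the chars before the first comma.
def clean_stress_levels_alt (value : String) : Int :=
  let pref := value.toList.takeWhile (· ≠ ',')
  let v : Int :=
    if pref.contains '-' then 0
    else
      let digits := pref.filter Char.isDigit
      if digits = [] then 50 else (PySem.Int.ofStr? (String.mk digits)).getD 0
  min v 100

-- ===== PRECONDITION & SPEC =====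
def Spec_clean_stress_levels (value : String) (out : Int) : Prop := out = clean_stress_levels_alt value
instance (value : String) (out : Int) : Decidable (Spec_clean_stress_levels value out) := by unfold Spec_clean_stress_levels; infer_instance

-- ===== CLAIM (what is proved, stated in full; the proofs are below) =====
def Claim_equal_clean_stress_levels : Prop := ∀ (value : String), Dom_clean_stress_levels value → Spec_clean_stress_levels value (clean_stress_levels value)

-- ===== LEMMAS AND PROOFS =====

-- ===== VERDICT (by name: the statement is the Claim_ definition above) =====
lemma csl_loop_eq (cs acc : List Char) :
    csl_loop cs acc =
      if (cs.takeWhile (· ≠ ',')).contains '-' then ['0']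
      else acc ++ (cs.takeWhile (· ≠ ',')).filter Char.isDigit := by
  induction cs generalizing acc with
  | nil => simp [csl_loop]
  | cons c rest ih =>
    simp only [csl_loop]
    by_cases hc : c = ','
    · subst hc; simp
    · by_cases hd : c = '-'
      · subst hd; simp
      · simp only [if_neg hc, if_neg hd]
        rw [ih]
        simp [hc, Ne.symm hd]
        split_ifs <;> simp_all

theorem clean_stress_levels_spec : Claim_equal_clean_stress_levels := by
  intro value _
  unfold Spec_clean_stress_levels clean_stress_levels clean_stress_levels_alt
  rw [csl_loop_eq]
  simp only [List.contains_eq_mem, ne_eq, decide_not]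
  by_cases hdash : '-' ∈ value.toList.takeWhile (fun x => !decide (x = ','))
  · simp only [hdash, decide_true, if_true]
    decide
  · simp only [hdash, decide_false, Bool.false_eq_true, if_false, List.nil_append]
    by_cases hdig : (value.toList.takeWhile (fun x => !decide (x = ','))).filter Char.isDigit = []
    · simp only [hdig, if_true]
      decide
    · simp only [hdig, if_false]
      omega
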